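-- pv_equiv track=rewrite | github.com/Nabin204/Python-100-days-challenge | 2)check_if_a_number_is_binary.py | binary_check
-- ===== SOURCE A (Python) =====
-- def binary_check(num : int)->bool:
--     binary_digit = [0,1]
--     while(num!=0):
--         remainder = num%10
--         if(remainder not in binary_digit):
--             return False
--             break
--         num //= 10
--     return True
-- ===== SOURCE B (Python) =====
-- def binary_check(num: int) -> bool:
--     return all(c in '01' for c in str(num))
-- ===== Notes on version B (the rewrite author's own statement) =====
-- stated objective: idiomatic
-- what changed: Replaces the modulo/floor-division digit-extraction while-loop with a one-line check that every character of str(num) is '0' or '1' (negatives fail on the '-' character, matching A's False on all negatives).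
import Mathlib
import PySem

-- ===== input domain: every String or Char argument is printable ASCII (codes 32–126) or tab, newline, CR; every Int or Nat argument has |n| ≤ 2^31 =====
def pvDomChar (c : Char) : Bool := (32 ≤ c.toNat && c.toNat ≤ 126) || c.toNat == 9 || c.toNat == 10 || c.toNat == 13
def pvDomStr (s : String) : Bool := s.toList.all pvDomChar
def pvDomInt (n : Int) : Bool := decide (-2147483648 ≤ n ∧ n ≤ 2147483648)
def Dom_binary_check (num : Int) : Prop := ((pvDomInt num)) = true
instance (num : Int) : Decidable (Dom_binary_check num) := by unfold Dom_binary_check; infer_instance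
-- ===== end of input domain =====

-- B checks every character of str(num) against '01' instead of A's modulo/floor-division digit loop (idiomatic; same cost).


-- ===== PORT A =====
-- while num != 0: take remainder = num % 10, bail out with False unless it is in [0, 1], num //= 10; finally True
def binary_check (num : Int) : Bool :=
  if num = 0 then true
  else
    let remainder := PySem.Int.mod num 10
    if !(([0, 1] : List Int).contains remainder) then false
    else binary_check (PySem.Int.floordiv num 10)
termination_by num.natAbs
decreasing_by
  rename_i h0 hc
  simp only [Bool.not_eq_eq_eq_not, Bool.not_true, List.contains_eq_mem, List.mem_cons,
    List.mem_singleton, decide_eq_false_iff_not, not_or, not_not] at hc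
  have heq := PySem.Int.floordiv_mul_add_mod num 10
  have h1 : (0 : Int) ≤ PySem.Int.mod num 10 := PySem.Int.mod_nonneg num (by norm_num)
  have h2 : PySem.Int.mod num 10 < 10 := PySem.Int.mod_lt num (by norm_num)
  rcases (by tauto : PySem.Int.mod num 10 = 0 ∨ PySem.Int.mod num 10 = 1) with h | h <;>
    rw [h] at heq <;> omega

-- ===== PORT B =====
-- all(c in '01' for c in str(num)); str(num) traversed as its character list ((PySem.Int.toStr num).toList = PySem.Int.toChars num)
def binary_check_alt (num : Int) : Bool :=
  (PySem.Int.toChars num).all (fun c => (['0', '1'] : List Char).contains c)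

-- ===== PRECONDITION & SPEC =====
def Spec_binary_check (num : Int) (out : Bool) : Prop := out = binary_check_alt num
instance (num : Int) (out : Bool) : Decidable (Spec_binary_check num out) := by unfold Spec_binary_check; infer_instance

-- ===== CLAIM (what is proved, stated in full; the proofs are below) =====
def Claim_equal_binary_check : Prop := ∀ (num : Int), Dom_binary_check num → Spec_binary_check num (binary_check num)

-- ===== LEMMAS AND PROOFS =====

-- the decimal digit characters of n, most significant first ([] for n = 0)
def recDigits (n : Nat) : List Char :=
  if n = 0 then [] else recDigits (n / 10) ++ [Nat.digitChar (n % 10)]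
decreasing_by exact Nat.div_lt_self (by omega) (by norm_num)

lemma toDigitsCore_eq_recDigits (f : Nat) :
    ∀ (n : Nat) (acc : List Char), n ≠ 0 → n < f →
      Nat.toDigitsCore 10 f n acc = recDigits n ++ acc := by
  induction f with
  | zero => intro n acc h0 hf; omega
  | succ f ih =>
    intro n acc h0 hf
    rw [recDigits]
    simp only [h0, if_false]
    show (if n / 10 = 0 then (n % 10).digitChar :: acc
          else Nat.toDigitsCore 10 f (n / 10) ((n % 10).digitChar :: acc)) = _
    by_cases hd : n / 10 = 0
    · simp [hd, recDigits]
    · rw [if_neg hd, ih (n / 10) _ hd (by omega)]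
      simp

lemma toDigits_eq_recDigits (n : Nat) (h : n ≠ 0) :
    Nat.toDigits 10 n = recDigits n := by
  have := toDigitsCore_eq_recDigits (n + 1) n [] h (by omega)
  simpa [Nat.toDigits] using this

lemma digitChar_mem_binary (d : Nat) (h : d < 10) :
    ((['0', '1'] : List Char).contains (Nat.digitChar d)) = decide (d = 0 ∨ d = 1) := by
  interval_cases d <;> decide

lemma binary_check_nonneg (n : Nat) :
    binary_check (n : Int) =
      (recDigits n).all (fun c => (['0', '1'] : List Char).contains c) := by
  induction n using Nat.strong_induction_on with
  | _ n ih =>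
    by_cases h0 : n = 0
    · subst h0; rw [recDigits]; simp [binary_check]
    · have hn0 : (n : Int) ≠ 0 := by exact_mod_cast h0
      have hmod : PySem.Int.mod (n : Int) 10 = ((n % 10 : Nat) : Int) := by
        exact_mod_cast PySem.Int.mod_natCast n 10
      have hdiv : PySem.Int.floordiv (n : Int) 10 = ((n / 10 : Nat) : Int) := by
        exact_mod_cast PySem.Int.floordiv_natCast n 10
      rw [binary_check, if_neg hn0]
      show (if !(([0, 1] : List Int).contains (PySem.Int.mod (n : Int) 10)) then false
            else binary_check (PySem.Int.floordiv (n : Int) 10)) = _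
      rw [recDigits, if_neg h0, hmod, hdiv, List.all_append]
      have hlt : n % 10 < 10 := Nat.mod_lt n (by omega)
      by_cases hr : n % 10 = 0 ∨ n % 10 = 1
      · have hc : (([0, 1] : List Int).contains ((n % 10 : Nat) : Int)) = true := by
          rcases hr with h | h <;> simp [h]
        rw [hc]
        simp only [Bool.not_true, Bool.false_eq_true, if_false, List.all_cons, List.all_nil,
          digitChar_mem_binary (n % 10) hlt]
        rw [ih (n / 10) (Nat.div_lt_self (by omega) (by norm_num))]
        simp [hr]
      · have hc : (([0, 1] : List Int).contains ((n % 10 : Nat) : Int)) = false := by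
          simp only [List.contains_eq_mem, List.mem_cons, List.not_mem_nil, or_false,
            decide_eq_false_iff_not, not_or]
          constructor
          · intro h; exact hr (Or.inl (by exact_mod_cast h))
          · intro h; exact hr (Or.inr (by exact_mod_cast h))
        rw [hc]
        have hd : ((['0', '1'] : List Char).contains ((n % 10).digitChar)) = false := by
          rw [digitChar_mem_binary (n % 10) hlt]; simpa using hr
        have hd' : ¬(n % 10).digitChar = '0' ∧ ¬(n % 10).digitChar = '1' := by
          simpa [not_or] using hd
        simp
        intro _
        exact hd'

lemma binary_check_neg : ∀ (k : Nat) (num : Int), num.natAbs = k → num < 0 →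
    binary_check num = false := by
  intro k
  induction k using Nat.strong_induction_on with
  | _ k ih =>
    intro num hk hneg
    rw [binary_check, if_neg (by omega)]
    show (if !(([0, 1] : List Int).contains (PySem.Int.mod num 10)) then false
          else binary_check (PySem.Int.floordiv num 10)) = false
    by_cases hc : (([0, 1] : List Int).contains (PySem.Int.mod num 10)) = true
    · rw [hc]
      simp only [Bool.not_true, if_false]
      have heq := PySem.Int.floordiv_mul_add_mod num 10
      have h1 : (0 : Int) ≤ PySem.Int.mod num 10 := PySem.Int.mod_nonneg num (by norm_num)
      have h2 : PySem.Int.mod num 10 < 10 := PySem.Int.mod_lt num (by norm_num)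
      have hr : PySem.Int.mod num 10 = 0 ∨ PySem.Int.mod num 10 = 1 := by
        simp only [List.contains_eq_mem, List.mem_cons, List.mem_singleton,
          decide_eq_true_eq] at hc
        tauto
      have hlt : (PySem.Int.floordiv num 10).natAbs < k := by
        rcases hr with h | h <;> rw [h] at heq <;> omega
      have hneg' : PySem.Int.floordiv num 10 < 0 := by
        rcases hr with h | h <;> rw [h] at heq <;> omega
      exact ih _ hlt _ rfl hneg'
    · rw [Bool.not_eq_true] at hc
      rw [hc]
      rfl

-- ===== VERDICT (by name: the statement is the Claim_ definition above) =====
theorem binary_check_spec : Claim_equal_binary_check := by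
  intro num _
  show binary_check num = binary_check_alt num
  by_cases hneg : num < 0
  · rw [binary_check_neg num.natAbs num rfl hneg]
    unfold binary_check_alt PySem.Int.toChars
    rw [if_pos hneg]
    simp
  · rw [not_lt] at hneg
    obtain ⟨n, rfl⟩ : ∃ n : Nat, num = (n : Int) := ⟨num.toNat, (Int.toNat_of_nonneg hneg).symm⟩
    unfold binary_check_alt PySem.Int.toChars
    rw [if_neg (by omega)]
    by_cases h0 : n = 0
    · subst h0
      simp only [Nat.cast_zero]
      rw [binary_check]
      simp only [if_pos rfl]
      decide
    · have ht : (n : Int).toNat = n := Int.toNat_natCast n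
      rw [ht, toDigits_eq_recDigits n h0, binary_check_nonneg n]
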